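-- pv_equiv track=rewrite | github.com/dkdlelk99/CSOS-Algorithm | BOJ/1316/ghwns82.py | check
-- ===== SOURCE A (Python) =====
-- def check(word):
--     b=set()
--     for i in word:
--         if i not in b:
--             b.add(i)
--             status = i
--         elif status == i:
--             continue
--         else:
--             return 0
--     return 1
-- ===== SOURCE B (Python) =====
-- from itertools import groupby
--
-- def check(word):
--     keys = [k for k, _ in groupby(word)]
--     return 1 if len(keys) == len(set(keys)) else 0
-- ===== Notes on version B (the rewrite author's own statement) =====
-- stated objective: idiomatic
-- what changed: Replaces A's single loop with incremental seen-set and status tracking (early return 0) by a two-phase structure: compress the word into its run keys (itertools.groupby) and return 1 iff the key list has no duplicates (len(keys) == len(set(keys))).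
import Mathlib
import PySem

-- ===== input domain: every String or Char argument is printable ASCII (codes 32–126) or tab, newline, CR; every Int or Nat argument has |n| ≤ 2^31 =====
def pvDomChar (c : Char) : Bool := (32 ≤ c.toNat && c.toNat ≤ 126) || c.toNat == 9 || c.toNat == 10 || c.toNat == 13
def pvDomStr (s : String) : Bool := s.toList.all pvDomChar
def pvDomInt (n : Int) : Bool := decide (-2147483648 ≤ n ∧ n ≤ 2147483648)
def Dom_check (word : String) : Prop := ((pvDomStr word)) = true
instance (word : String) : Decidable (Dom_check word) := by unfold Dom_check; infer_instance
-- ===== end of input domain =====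

-- B is an idiomatic two-phase rewrite (compress into run keys, then test for duplicate keys); same cost, equivalence of RETURN values proved for all inputs.

-- ===== PORT A =====
-- the for-loop of A: state = seen set b, current run character status (none before the first iteration)
def checkLoop : List Char → PySem.Set Char → Option Char → Int
  | [], _, _ => 1
  | i :: rest, b, status =>
    if !(PySem.Set.contains b i) then checkLoop rest (PySem.Set.add b i) (some i)
    else if status = some i then checkLoop rest b status
    else 0

def check (word : String) : Int := checkLoop word.toList PySem.Set.empty none

-- ===== PORT B =====
-- [k for k, _ in groupby(word)] : one key per maximal block of equal consecutive characters
def runKeys : List Char → List Char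
  | [] => []
  | a :: rest => a :: runKeys (rest.dropWhile (· == a))
termination_by l => l.length
decreasing_by
  have := List.length_dropWhile_le (· == a) rest
  simp
  omega

def check_alt (word : String) : Int :=
  let keys := runKeys word.toList
  if keys.length = (PySem.Set.ofList keys).length then 1 else 0

-- ===== PRECONDITION & SPEC =====
def Spec_check (word : String) (out : Int) : Prop := out = check_alt word
instance (word : String) (out : Int) : Decidable (Spec_check word out) := by unfold Spec_check; infer_instance

-- ===== CLAIM (what is proved, stated in full; the proofs are below) =====
def Claim_equal_check : Prop := ∀ (word : String), Dom_check word → Spec_check word (check word)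

-- ===== LEMMAS AND PROOFS =====

theorem foldl_add_len_le (xs : List Char) (s : PySem.Set Char) :
    (xs.foldl PySem.Set.add s).length ≤ s.length + xs.length := by
  induction xs generalizing s with
  | nil => simp
  | cons a xs ih =>
    simp only [List.foldl_cons, List.length_cons]
    calc (xs.foldl PySem.Set.add (PySem.Set.add s a)).length
        ≤ (PySem.Set.add s a).length + xs.length := ih _
      _ ≤ s.length + (xs.length + 1) := by
          simp [PySem.Set.add_eq_ite]; split_ifs <;> simp <;> omega

theorem foldl_add_len_eq_iff (xs : List Char) (s : PySem.Set Char) :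
    (xs.foldl PySem.Set.add s).length = s.length + xs.length ↔
      xs.Nodup ∧ ∀ x ∈ xs, x ∉ s := by
  induction xs generalizing s with
  | nil => simp
  | cons a xs ih =>
    simp only [List.foldl_cons, List.length_cons, List.nodup_cons]
    by_cases ha : a ∈ s
    · rw [PySem.Set.add_of_mem ha]
      have hle := foldl_add_len_le xs s
      constructor
      · intro h; omega
      · rintro ⟨-, h⟩; exact absurd ha (h a (by simp))
    · rw [PySem.Set.add_of_not_mem ha]
      have ihs := ih (s ++ [a])
      rw [show (s ++ [a]).length = s.length + 1 from by simp] at ihs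
      rw [show s.length + (xs.length + 1) = (s.length + 1) + xs.length by omega]
      rw [ihs]
      constructor
      · rintro ⟨hn, h⟩
        have h' : ∀ x ∈ xs, x ∉ s ∧ x ≠ a := by
          intro x hx
          have hxm := h x hx
          simp only [List.mem_append, List.mem_singleton] at hxm
          exact ⟨fun hs' => hxm (Or.inl hs'), fun he => hxm (Or.inr he)⟩
        refine ⟨⟨fun hax => (h' a hax).2 rfl, hn⟩, ?_⟩
        intro x hx
        rcases List.mem_cons.mp hx with rfl | hx
        · exact ha
        · exact (h' x hx).1
      · rintro ⟨⟨hax, hn⟩, h⟩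
        refine ⟨hn, fun x hx => ?_⟩
        simp only [List.mem_append, List.mem_singleton]
        rintro (hxs | rfl)
        · exact h x (List.mem_cons.mpr (Or.inr hx)) hxs
        · exact hax hx

theorem len_ofList_eq_iff (xs : List Char) :
    (xs.length = (PySem.Set.ofList xs).length) ↔ xs.Nodup := by
  rw [PySem.Set.ofList_eq_foldl]
  constructor
  · intro h
    have := (foldl_add_len_eq_iff xs ([] : PySem.Set Char)).mp (by simpa using h.symm)
    exact this.1
  · intro h
    have := (foldl_add_len_eq_iff xs ([] : PySem.Set Char)).mpr ⟨h, by simp⟩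
    simpa using this.symm

theorem checkLoop_eq (l : List Char) : ∀ (b : PySem.Set Char) (s : Char), s ∈ b →
    checkLoop l b (some s) =
      if (runKeys (l.dropWhile (· == s))).Nodup ∧
         ∀ k ∈ runKeys (l.dropWhile (· == s)), k ∉ b then 1 else 0 := by
  induction l with
  | nil => intro b s _; simp [checkLoop, runKeys]
  | cons i rest ih =>
    intro b s hs
    by_cases his : i = s
    · subst his
      have hcont : PySem.Set.contains b i = true := (PySem.Set.contains_iff _ _).mpr hs
      simp only [checkLoop, hcont, Bool.not_true, Bool.false_eq_true, if_false]
      rw [List.dropWhile_cons_of_pos (by simp)]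
      exact ih b i hs
    · rw [List.dropWhile_cons_of_neg (by simp [his])]
      by_cases hib : i ∈ b
      · have hcont : PySem.Set.contains b i = true := (PySem.Set.contains_iff _ _).mpr hib
        have hne : ¬ (some s = some i) := by
          simp only [Option.some.injEq]
          exact fun h => his h.symm
        simp only [checkLoop, hcont, Bool.not_true, Bool.false_eq_true, if_false, if_neg hne]
        rw [if_neg]
        rintro ⟨-, h⟩
        exact h i (by simp [runKeys]) hib
      · have hcont : PySem.Set.contains b i = false := by
          cases hcc : PySem.Set.contains b i
          · rfl
          · exact absurd ((PySem.Set.contains_iff _ _).mp hcc) hib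
        simp only [checkLoop, hcont, Bool.not_false, if_pos]
        rw [ih (PySem.Set.add b i) i (by rw [PySem.Set.mem_add]; right; rfl)]
        apply if_congr _ rfl rfl
        simp only [runKeys, List.nodup_cons, List.mem_cons, PySem.Set.mem_add]
        constructor
        · rintro ⟨hn, h⟩
          refine ⟨⟨fun hiK => ?_, hn⟩, fun k hk => ?_⟩
          · exact (h i hiK) (Or.inr rfl)
          · rcases hk with rfl | hk
            · exact hib
            · intro hkb; exact h k hk (Or.inl hkb)
        · rintro ⟨⟨hiK, hn⟩, h⟩
          refine ⟨hn, fun k hk => ?_⟩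
          rintro (hkb | rfl)
          · exact h k (Or.inr hk) hkb
          · exact hiK hk

theorem check_eq_alt (word : String) : check word = check_alt word := by
  unfold check check_alt
  cases h : word.toList with
  | nil => simp [checkLoop, runKeys, PySem.Set.ofList]
  | cons c rest =>
    have hcont : PySem.Set.contains (PySem.Set.empty : PySem.Set Char) c = false := by
      simp [PySem.Set.empty, PySem.Set.contains]
    have hadd : PySem.Set.add (PySem.Set.empty : PySem.Set Char) c = [c] := by
      simp [PySem.Set.empty, PySem.Set.add_of_not_mem]
    simp only [checkLoop, hcont, Bool.not_false, if_pos, hadd]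
    rw [checkLoop_eq rest [c] c (by simp)]
    apply if_congr _ rfl rfl
    rw [show runKeys (c :: rest) = c :: runKeys (rest.dropWhile (· == c)) from by simp [runKeys]]
    rw [len_ofList_eq_iff, List.nodup_cons]
    constructor
    · rintro ⟨hn, h⟩
      refine ⟨fun hc => ?_, hn⟩
      exact h c hc (by simp)
    · rintro ⟨hc, hn⟩
      refine ⟨hn, fun k hk => ?_⟩
      simp only [List.mem_singleton]
      rintro rfl
      exact hc hk

-- ===== VERDICT (by name: the statement is the Claim_ definition above) =====
theorem check_spec : Claim_equal_check := by
  intro word _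
  unfold Spec_check
  exact check_eq_alt word
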